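-- pv_equiv track=rewrite | github.com/glorious-purpose/coding_help | personal/leetcode/python/reducing_dishes.py | max_sat
-- ===== SOURCE A (Python) =====
-- def max_sat(satisfaction: list[int]) -> int:
--     def calc_sat(sat_list: list[int]) -> int:
--         return sum(i * x for i, x in enumerate(sat_list, 1))
--
--     satisfaction.sort()
--     if satisfaction[-1] <= 0:
--         return 0
--     max_val = calc_sat(satisfaction)
--     for i in range(1, len(satisfaction)):
--         if (this_sat := calc_sat(satisfaction[i:])) < max_val:
--             return max_val
--         max_val = this_sat
--     return max_val
-- ===== SOURCE B (Python) =====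
-- def max_sat(satisfaction: list[int]) -> int:
--     total = running = 0
--     for x in reversed(sorted(satisfaction)):
--         if running + x <= 0:
--             break
--         running += x
--         total += running
--     return total
-- ===== Notes on version B (the rewrite author's own statement) =====
-- stated objective: alternative
-- what changed: Replaced the repeated calc_sat recomputation over every suffix (quadratic in the worst case, but often cut short by the early return) by one sort plus a single backward pass that maintains a running suffix sum and stops when adding the next dish would not help.
import Mathlib
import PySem

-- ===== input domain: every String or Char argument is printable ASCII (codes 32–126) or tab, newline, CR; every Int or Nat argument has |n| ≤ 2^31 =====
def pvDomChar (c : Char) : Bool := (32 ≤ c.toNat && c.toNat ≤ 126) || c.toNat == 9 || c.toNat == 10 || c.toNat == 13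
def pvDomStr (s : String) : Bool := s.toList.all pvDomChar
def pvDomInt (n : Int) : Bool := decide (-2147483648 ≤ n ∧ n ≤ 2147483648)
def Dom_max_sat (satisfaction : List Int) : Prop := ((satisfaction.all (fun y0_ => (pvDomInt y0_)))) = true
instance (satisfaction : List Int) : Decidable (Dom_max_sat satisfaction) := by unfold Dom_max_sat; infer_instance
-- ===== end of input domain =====

-- B replaces A's repeated calc_sat recomputation over suffixes by one sort plus a single
-- backward pass with a running suffix sum (alternative algorithm). A sorts its argument
-- IN PLACE; the equivalence proved here is about the RETURN value only.

-- ===== PORT A =====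
-- sum(i * x for i, x in enumerate(sat_list, 1))
def calcSat (l : List Int) : Int :=
  ((PySem.List.enumerate l 1).map (fun p => p.1 * p.2)).sum

-- the for-loop of A with its early return, as recursion on the index i
def maxSatLoop (s : List Int) (n : Nat) (i : Nat) (m : Int) : Int :=
  if _h : i < n then
    let t := calcSat (PySem.List.slice s (some (i : Int)) none)
    if t < m then m else maxSatLoop s n (i + 1) t
  else m
  termination_by n - i

def max_sat (satisfaction : List Int) : Int :=
  let s := PySem.List.sorted satisfaction (fun x => x) false
  match PySem.List.pyGet? s (-1) with
  | none => 0  -- IndexError on the empty list; excluded by Pre_max_sat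
  | some last =>
    if last ≤ 0 then 0
    else maxSatLoop s s.length 1 (calcSat s)

-- ===== PORT B =====
-- the for-loop of B with its break, as structural recursion over the reversed sorted list
def altLoop : List Int → Int → Int → Int
  | [], _, total => total
  | x :: rest, running, total =>
    if running + x ≤ 0 then total
    else altLoop rest (running + x) (total + (running + x))

def max_sat_alt (satisfaction : List Int) : Int :=
  altLoop (PySem.List.sorted satisfaction (fun x => x) false).reverse 0 0

-- ===== PRECONDITION & SPEC =====
-- Pre_ excludes only the empty list, on which A raises IndexError (satisfaction[-1]).
def Pre_max_sat (satisfaction : List Int) : Prop := satisfaction ≠ []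
instance (satisfaction : List Int) : Decidable (Pre_max_sat satisfaction) := by
  unfold Pre_max_sat; infer_instance
def pvWitness_max_sat : List Int := [-1, 4, 2]

def Spec_max_sat (satisfaction : List Int) (out : Int) : Prop := out = max_sat_alt satisfaction
instance (satisfaction : List Int) (out : Int) : Decidable (Spec_max_sat satisfaction out) := by
  unfold Spec_max_sat; infer_instance

-- ===== CLAIM (what is proved, stated in full; the proofs are below) =====
def Claim_equal_max_sat : Prop := ∀ (satisfaction : List Int), Dom_max_sat satisfaction → Pre_max_sat satisfaction → Spec_max_sat satisfaction (max_sat satisfaction)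

-- ===== LEMMAS AND PROOFS =====

-- the common mathematical form of both programs: drop smallest elements while the
-- total (suffix) sum is not positive, then take the weighted sum of the rest
def gspec : List Int → Int
  | [] => 0
  | x :: t => if 0 < x + t.sum then calcSat (x :: t) else gspec t

-- running-sum accumulation of B's loop when it never breaks
def srAcc : List Int → Int → Int
  | [], _ => 0
  | x :: t, r => (r + x) + srAcc t (r + x)

theorem enumMulSum_shift (t : List Int) (s : Int) :
    ((PySem.List.enumerate t (s + 1)).map (fun p => p.1 * p.2)).sum
      = ((PySem.List.enumerate t s).map (fun p => p.1 * p.2)).sum + t.sum := by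
  induction t generalizing s with
  | nil => simp [PySem.List.enumerate]
  | cons x t ih =>
    simp only [PySem.List.enumerate_cons, List.map_cons, List.sum_cons, ih (s + 1)]
    ring

theorem calcSat_cons (x : Int) (t : List Int) :
    calcSat (x :: t) = x + t.sum + calcSat t := by
  unfold calcSat
  simp only [PySem.List.enumerate_cons, List.map_cons, List.sum_cons]
  rw [enumMulSum_shift t 1]
  ring

theorem sum_nonpos_of_all (l : List Int) (h : ∀ y ∈ l, y ≤ 0) : l.sum ≤ 0 := by
  induction l with
  | nil => simp
  | cons x t ih =>
    have := h x (by simp)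
    have := ih (fun y hy => h y (by simp [hy]))
    simp only [List.sum_cons]; omega

theorem gspec_zero (l : List Int) (h : ∀ y ∈ l, y ≤ 0) : gspec l = 0 := by
  induction l with
  | nil => rfl
  | cons x t ih =>
    have hx := h x (by simp)
    have hs := sum_nonpos_of_all t (fun y hy => h y (by simp [hy]))
    have : ¬ 0 < x + t.sum := by omega
    simp [gspec, this, ih (fun y hy => h y (by simp [hy]))]


-- ---- B-side: altLoop characterisation ----

theorem altLoop_no_break (d : List Int) : ∀ r tot : Int,
    (∀ p q, d = p ++ q → p ≠ [] → 0 < r + p.sum) →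
    altLoop d r tot = tot + srAcc d r := by
  induction d with
  | nil => intro r tot _; simp [altLoop, srAcc]
  | cons x t ih =>
    intro r tot h
    have hx : 0 < r + x := by simpa using h [x] t rfl (by simp)
    rw [altLoop, if_neg (by omega), ih (r + x) (tot + (r + x)) ?_, srAcc]
    · ring
    · intro p q hpq hp
      have := h (x :: p) q (by simp [hpq]) (by simp)
      simp only [List.sum_cons] at this; omega

theorem altLoop_dropLast (d : List Int) : ∀ r tot : Int, r + d.sum ≤ 0 →
    altLoop d r tot = altLoop d.dropLast r tot := by
  induction d with
  | nil => intros; rfl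
  | cons x t ih =>
    intro r tot h
    cases t with
    | nil =>
      simp only [List.sum_cons, List.sum_nil] at h
      simp [altLoop, show r + x ≤ 0 by omega]
    | cons y u =>
      rw [List.dropLast_cons₂]
      by_cases hx : r + x ≤ 0
      · have e1 : altLoop (x :: y :: u) r tot = tot := by rw [altLoop, if_pos hx]
        have e2 : altLoop (x :: (y :: u).dropLast) r tot = tot := by rw [altLoop, if_pos hx]
        rw [e1, e2]
      · have e1 : altLoop (x :: y :: u) r tot
            = altLoop (y :: u) (r + x) (tot + (r + x)) := by rw [altLoop, if_neg hx]
        have e2 : altLoop (x :: (y :: u).dropLast) r tot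
            = altLoop ((y :: u).dropLast) (r + x) (tot + (r + x)) := by rw [altLoop, if_neg hx]
        rw [e1, e2]
        refine ih (r + x) _ ?_
        simp only [List.sum_cons] at h ⊢; omega

theorem srAcc_shift (t : List Int) : ∀ r : Int, srAcc t r = r * (t.length : Int) + srAcc t 0 := by
  induction t with
  | nil => simp [srAcc]
  | cons x u ih =>
    intro r
    rw [srAcc, srAcc, ih (r + x), ih (0 + x)]
    simp only [List.length_cons]
    push_cast; ring

theorem calcSat_append_singleton (l : List Int) (x : Int) :
    calcSat (l ++ [x]) = calcSat l + x * ((l.length : Int) + 1) := by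
  induction l with
  | nil => simp [calcSat, PySem.List.enumerate]
  | cons y u ih =>
    rw [List.cons_append, calcSat_cons, calcSat_cons, ih]
    simp only [List.sum_append, List.sum_cons, List.sum_nil, List.length_cons]
    push_cast; ring

theorem srAcc_eq_calcSat_reverse (d : List Int) : srAcc d 0 = calcSat d.reverse := by
  induction d with
  | nil => simp [srAcc, calcSat]
  | cons x t ih =>
    rw [List.reverse_cons, calcSat_append_singleton, ← ih, srAcc, srAcc_shift t (0 + x)]
    simp only [List.length_reverse]
    ring

theorem sum_pos_of_all_pos (l : List Int) (h : ∀ y ∈ l, 0 < y) (hne : l ≠ []) : 0 < l.sum := by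
  induction l with
  | nil => exact absurd rfl hne
  | cons x t ih =>
    have hx := h x (by simp)
    cases t with
    | nil => simpa using hx
    | cons y u =>
      have := ih (fun z hz => h z (by simp [hz])) (by simp)
      simp only [List.sum_cons] at this ⊢
      omega

theorem asc_suffix_pos (s : List Int) (hs : s.Pairwise (· ≤ ·)) (hsum : 0 < s.sum)
    (q p : List Int) (hqp : s = q ++ p) (hp : p ≠ []) : 0 < p.sum := by
  by_contra hle
  simp only [not_lt] at hle
  obtain ⟨a, p', rfl⟩ := List.exists_cons_of_ne_nil hp
  subst hqp
  rw [List.pairwise_append] at hs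
  obtain ⟨hq, hps, hqps⟩ := hs
  by_cases ha : 0 < a
  · have hall : ∀ y ∈ a :: p', 0 < y := by
      intro y hy
      rcases List.mem_cons.1 hy with rfl | hy'
      · exact ha
      · have := (List.pairwise_cons.1 hps).1 y hy'; omega
    exact absurd (sum_pos_of_all_pos _ hall (by simp)) (by omega)
  · have hq0 : ∀ y ∈ q, y ≤ 0 := fun y hy => by
      have := hqps y hy a (by simp); omega
    have := sum_nonpos_of_all q hq0
    rw [List.sum_append] at hsum
    omega

theorem altLoop_eq_gspec (s : List Int) (hs : s.Pairwise (· ≤ ·)) :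
    altLoop s.reverse 0 0 = gspec s := by
  induction s with
  | nil => rfl
  | cons x t ih =>
    by_cases hpos : 0 < x + t.sum
    · rw [altLoop_no_break _ 0 0 ?_, srAcc_eq_calcSat_reverse, List.reverse_reverse]
      · simp [gspec, hpos]
      · intro p q hpq hp
        have hsum : 0 < (x :: t).sum := by simp only [List.sum_cons]; omega
        have h1 : x :: t = q.reverse ++ p.reverse := by
          have := congrArg List.reverse hpq
          simpa [List.reverse_append] using this
        have := asc_suffix_pos (x :: t) hs hsum q.reverse p.reverse h1 (by simpa using hp)
        simpa using this
    · rw [List.reverse_cons, altLoop_dropLast _ 0 0 ?_, List.dropLast_concat]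
      · rw [ih (List.pairwise_cons.1 hs).2]
        simp [gspec, hpos]
      · simp only [List.sum_append, List.sum_cons, List.sum_nil, List.sum_reverse]; omega

-- ---- A-side: maxSatLoop characterisation ----

theorem le_getLast_of_sorted (s : List Int) (hs : s.Pairwise (· ≤ ·)) (hne : s ≠ [])
    (y : Int) (hy : y ∈ s) : y ≤ s.getLast hne := by
  have hds : s.dropLast ++ [s.getLast hne] = s := List.dropLast_concat_getLast hne
  rw [← hds] at hs hy
  rw [List.pairwise_append] at hs
  rcases List.mem_append.1 hy with h | h
  · exact hs.2.2 y h _ (by simp)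
  · simp at h; omega

theorem drop_pred_length (s : List Int) (hne : s ≠ []) :
    s.drop (s.length - 1) = [s.getLast hne] := by
  obtain ⟨l, a, rfl⟩ : ∃ l a, s = l ++ [a] :=
    ⟨s.dropLast, s.getLast hne, (List.dropLast_concat_getLast hne).symm⟩
  have h1 : (l ++ [a]).length - 1 = l.length := by simp
  rw [h1, List.drop_left]
  simp

theorem maxSatLoop_eq_gspec (s : List Int) (hne : s ≠ [])
    (hlast : 0 < s.getLast hne) :
    ∀ k i, 1 ≤ i → i ≤ s.length → s.length - i = k →
      maxSatLoop s s.length i (calcSat (s.drop (i - 1))) = gspec (s.drop (i - 1)) := by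
  intro k
  induction k with
  | zero =>
    intro i h1 h2 hk
    rw [maxSatLoop, dif_neg (by omega)]
    have : i = s.length := by omega
    subst this
    rw [drop_pred_length s hne]
    simp [gspec, hlast]
  | succ k ih =>
    intro i h1 h2 hk
    have hlt : i < s.length := by omega
    have hi1 : i - 1 < s.length := by omega
    have e : i - 1 + 1 = i := by omega
    have hdropcons : s.drop (i - 1) = s[i - 1] :: s.drop i := by
      rw [List.drop_eq_getElem_cons hi1, e]
    have hslice : PySem.List.slice s (some (i : Int)) none = s.drop i :=
      PySem.List.slice_from_natCast ..
    rw [maxSatLoop, dif_pos hlt]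
    simp only [hslice, hdropcons, calcSat_cons, gspec]
    by_cases hc : 0 < s[i - 1] + (s.drop i).sum
    · rw [if_pos (by omega), if_pos hc]
    · rw [if_neg (by omega), if_neg hc]
      have := ih (i + 1) (by omega) (by omega) (by omega)
      simpa using this

-- ---- putting it together ----

theorem coreA_eq_gspec (s : List Int) (hs : s.Pairwise (· ≤ ·)) (hne : s ≠ []) :
    (match PySem.List.pyGet? s (-1) with
     | none => 0
     | some last => if last ≤ 0 then 0 else maxSatLoop s s.length 1 (calcSat s)) = gspec s := by
  rw [PySem.List.pyGet?_neg_one,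
    show s.getLast? = some (s.getLast hne) from List.getLast?_eq_some_getLast hne]
  show (if s.getLast hne ≤ 0 then 0 else maxSatLoop s s.length 1 (calcSat s)) = gspec s
  by_cases h : s.getLast hne ≤ 0
  · simp only [h, if_true]
    exact (gspec_zero s (fun y hy => le_trans (le_getLast_of_sorted s hs hne y hy) h)).symm
  · simp only [h, if_false]
    have := maxSatLoop_eq_gspec s hne (by omega) (s.length - 1) 1 (le_refl 1)
      (by have := List.length_pos_of_ne_nil hne; omega) rfl
    simpa using this

theorem max_sat_spec : Claim_equal_max_sat := by
  intro sat _ hpre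
  unfold Spec_max_sat
  have hsne : PySem.List.sorted sat (fun x => x) false ≠ [] := by
    intro h
    have := (PySem.List.sorted_perm (xs := sat) (key := fun x => x) (rev := false)).length_eq
    rw [h] at this
    exact hpre (List.eq_nil_of_length_eq_zero this.symm)
  have hpair : (PySem.List.sorted sat (fun x => x) false).Pairwise (· ≤ ·) :=
    PySem.List.sorted_pairwise ..
  have hA : max_sat sat = gspec (PySem.List.sorted sat (fun x => x) false) := by
    unfold max_sat
    exact coreA_eq_gspec _ hpair hsne
  have hB : max_sat_alt sat = gspec (PySem.List.sorted sat (fun x => x) false) := by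
    unfold max_sat_alt
    exact altLoop_eq_gspec _ hpair
  rw [hA, hB]
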